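-- pv_equiv track=rewrite | github.com/yousojeong/pdf-table2json | pdf_table2json/util.py | f_group_list
-- ===== SOURCE A (Python) =====
-- def f_group_list(input_list):
--
--     result_list = []
--     current_group = []
--     prev_length = None
--
--     for item in input_list:
--         current_length = len(item)
--
--         if prev_length is None:
--             prev_length = current_length
--             current_group = [item]
--         elif prev_length == current_length:
--             current_group.append(item)
--         else:
--             result_list.append(current_group)
--             current_group = [item]
--             prev_length = current_length
--
--     if current_group:
--         result_list.append(current_group)
--
--     return result_list
-- ===== SOURCE B (Python) =====
-- def f_group_list(input_list):
--     # Stage 1: list of lengths; Stage 2: boundary indices where a new run starts;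
--     # Stage 3: slice the input at consecutive boundaries.
--     lengths = [len(x) for x in input_list]
--     bounds = [i for i in range(len(input_list)) if i == 0 or lengths[i] != lengths[i - 1]]
--     bounds.append(len(input_list))
--     return [input_list[a:b] for a, b in zip(bounds, bounds[1:])]
-- ===== Notes on version B (the rewrite author's own statement) =====
-- stated objective: alternative
-- what changed: Replaces A's single-pass prev_length/current_group state machine with three staged passes: a lengths list, the list of run-start boundary indices, and slicing the input at consecutive boundaries.
import Mathlib
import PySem

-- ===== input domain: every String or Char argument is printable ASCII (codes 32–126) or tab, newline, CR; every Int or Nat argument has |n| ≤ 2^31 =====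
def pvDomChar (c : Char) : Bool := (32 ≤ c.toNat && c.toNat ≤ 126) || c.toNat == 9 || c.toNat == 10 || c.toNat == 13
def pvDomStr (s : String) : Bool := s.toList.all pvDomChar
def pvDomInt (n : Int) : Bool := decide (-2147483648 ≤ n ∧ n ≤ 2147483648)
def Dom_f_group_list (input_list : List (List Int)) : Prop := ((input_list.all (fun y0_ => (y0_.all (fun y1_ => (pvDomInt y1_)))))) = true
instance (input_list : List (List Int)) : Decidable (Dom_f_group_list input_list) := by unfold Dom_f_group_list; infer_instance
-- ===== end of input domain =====

-- B replaces A's one-pass prev_length/current_group state machine by three staged passes: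
-- a lengths list, the list of run-start boundary indices, and slicing at consecutive boundaries (alternative decomposition).


-- ===== PORT A =====
-- Loop state: (result_list, current_group, prev_length); flush non-empty group at the end.
def fglStep (st : List (List (List Int)) × List (List Int) × Option Nat) (item : List Int) :
    List (List (List Int)) × List (List Int) × Option Nat :=
  let currentLength := item.length
  match st with
  | (resultList, currentGroup, prevLength) =>
    match prevLength with
    | none => (resultList, [item], some currentLength)
    | some p =>
      if p = currentLength then (resultList, currentGroup ++ [item], some p)
      else (resultList ++ [currentGroup], [item], some currentLength)

def f_group_list (input_list : List (List Int)) : List (List (List Int)) :=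
  let st := input_list.foldl fglStep ([], [], none)
  if st.2.1 ≠ [] then st.1 ++ [st.2.1] else st.1

-- ===== PORT B =====
-- lengths = [len(x) for x in input_list]; bounds = run-start indices (plus the total length);
-- result = the slices input_list[a:b] for consecutive bounds a, b.
-- The slice input_list[a:b] is ported as drop/take, exact here since 0 ≤ a ≤ b (cf. PySem.List.slice_of_nonneg).
def f_group_list_alt (input_list : List (List Int)) : List (List (List Int)) :=
  let n := input_list.length
  let lengths := input_list.map List.length
  let bounds := (List.range n).filter (fun i => i == 0 || lengths.getD i 0 != lengths.getD (i - 1) 0)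
  let bounds2 := bounds ++ [n]
  (bounds2.zip bounds2.tail).map (fun p => (input_list.drop p.1).take (p.2 - p.1))

-- ===== PRECONDITION & SPEC =====
def Spec_f_group_list (input_list : List (List Int)) (out : List (List (List Int))) : Prop := out = f_group_list_alt input_list
instance (input_list : List (List Int)) (out : List (List (List Int))) : Decidable (Spec_f_group_list input_list out) := by unfold Spec_f_group_list; infer_instance

-- ===== CLAIM (what is proved, stated in full; the proofs are below) =====
def Claim_equal_f_group_list : Prop := ∀ (input_list : List (List Int)), Dom_f_group_list input_list → Spec_f_group_list input_list (f_group_list input_list)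

-- ===== LEMMAS AND PROOFS =====

-- Common reference: recursive grouping by maximal runs of equal length.
def fglRun (n : Nat) : List (List Int) → List (List Int) × List (List Int)
  | [] => ([], [])
  | x :: xs =>
    if x.length = n then
      let r := fglRun n xs
      (x :: r.1, r.2)
    else ([], x :: xs)

theorem fglRun_rest_le (n : Nat) (xs : List (List Int)) : (fglRun n xs).2.length ≤ xs.length := by
  induction xs with
  | nil => simp [fglRun]
  | cons x xs ih =>
    simp only [fglRun]
    split
    · exact Nat.le_trans ih (Nat.le_succ _)
    · simp

def fglRec : List (List Int) → List (List (List Int))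
  | [] => []
  | x :: xs =>
    let r := fglRun x.length xs
    (x :: r.1) :: fglRec r.2
termination_by l => l.length
decreasing_by
  simpa using Nat.lt_succ_of_le (fglRun_rest_le x.length xs)

-- ---- A = fglRec ----
def fglFinish (st : List (List (List Int)) × List (List Int) × Option Nat) : List (List (List Int)) :=
  if st.2.1 ≠ [] then st.1 ++ [st.2.1] else st.1

theorem fgl_invariant (xs : List (List Int)) :
    ∀ (res : List (List (List Int))) (g : List (List Int)) (n : Nat), g ≠ [] →
      fglFinish (xs.foldl fglStep (res, g, some n)) =
        res ++ (g ++ (fglRun n xs).1) :: fglRec (fglRun n xs).2 := by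
  induction xs with
  | nil =>
    intro res g n hg
    simp [fglFinish, fglRun, fglRec, hg]
  | cons x xs ih =>
    intro res g n hg
    by_cases h : n = x.length
    · subst h
      simp only [List.foldl_cons, fglStep, if_true]
      rw [ih res (g ++ [x]) x.length (by simp)]
      simp [fglRun]
    · simp only [List.foldl_cons, fglStep, if_neg h]
      rw [ih (res ++ [g]) [x] x.length (by simp)]
      rw [show fglRun n (x :: xs) = ([], x :: xs) by simp [fglRun, Ne.symm h]]
      simp [fglRec]

theorem a_eq_rec (l : List (List Int)) : f_group_list l = fglRec l := by
  cases l with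
  | nil => simp [f_group_list, fglRec]
  | cons x xs =>
    show fglFinish ((x :: xs).foldl fglStep ([], [], none)) = _
    simp only [List.foldl_cons, fglStep]
    rw [fgl_invariant xs [] [x] x.length (by simp)]
    simp [fglRec]

-- ---- fglRun decomposition facts ----
theorem fglRun_split (n : Nat) (xs : List (List Int)) :
    (fglRun n xs).1 ++ (fglRun n xs).2 = xs ∧
    (∀ y ∈ (fglRun n xs).1, y.length = n) ∧
    (∀ h ∈ (fglRun n xs).2.head?, h.length ≠ n) := by
  induction xs with
  | nil => simp [fglRun]
  | cons x xs ih =>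
    simp only [fglRun]
    split
    · refine ⟨by simp [ih.1], ?_, ih.2.2⟩
      intro y hy
      rcases List.mem_cons.1 hy with h | h
      · simpa [h] using ‹x.length = n›
      · exact ih.2.1 y h
    · exact ⟨rfl, by simp, by simpa using ‹¬ x.length = n›⟩

-- ---- B = fglRec ----
-- Unfold B's let-chain.
def fglBounds (l : List (List Int)) : List Nat :=
  (List.range l.length).filter
    (fun i => i == 0 || (l.map List.length).getD i 0 != (l.map List.length).getD (i - 1) 0)

def fglBounds2 (l : List (List Int)) : List Nat := fglBounds l ++ [l.length]

theorem alt_eq (l : List (List Int)) :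
    f_group_list_alt l =
      ((fglBounds2 l).zip (fglBounds2 l).tail).map (fun p => (l.drop p.1).take (p.2 - p.1)) := rfl

theorem bounds_head (l : List (List Int)) : fglBounds2 l = 0 :: (fglBounds2 l).tail := by
  cases l with
  | nil => rfl
  | cons x xs =>
    simp only [fglBounds2, fglBounds, List.length_cons, List.range_succ_eq_map, List.filter_cons]
    simp

-- boundary structure of a run-decomposed list
theorem bounds_append (g rest : List (List Int)) (k : Nat) (hg : g ≠ [])
    (hgk : ∀ y ∈ g, y.length = k) (hr : ∀ h ∈ rest.head?, h.length ≠ k) :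
    fglBounds (g ++ rest) = 0 :: (fglBounds rest).map (fun x => g.length + x) := by
  have hL : (g ++ rest).map List.length = g.map List.length ++ rest.map List.length := by simp
  have hgl : 1 ≤ g.length := by
    cases g with
    | nil => exact absurd rfl hg
    | cons _ _ => simp
  have getg : ∀ i < g.length, ((g ++ rest).map List.length).getD i 0 = k := by
    intro i hi
    rw [hL, List.getD_append _ _ _ _ (by simpa using hi)]
    rw [List.getD_eq_getElem _ _ (by simpa using hi)]
    simpa using hgk g[i] (List.getElem_mem _)
  have getr : ∀ j, ((g ++ rest).map List.length).getD (g.length + j) 0 = (rest.map List.length).getD j 0 := by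
    intro j
    rw [hL, List.getD_append_right _ _ _ _ (by simp)]
    simp
  unfold fglBounds
  rw [List.length_append, List.range_add, List.filter_append]
  -- first block: only index 0 survives
  have h1 : (List.range g.length).filter
      (fun i => i == 0 || ((g ++ rest).map List.length).getD i 0 != ((g ++ rest).map List.length).getD (i - 1) 0) = [0] := by
    obtain ⟨m, hm⟩ : ∃ m, g.length = m + 1 := ⟨g.length - 1, by omega⟩
    rw [hm, List.range_succ_eq_map, List.filter_cons]
    simp only [beq_self_eq_true, Bool.true_or, if_true]
    have : ∀ j ∈ (List.range m).map (· + 1), ¬ ((fun i => i == 0 || ((g ++ rest).map List.length).getD i 0 != ((g ++ rest).map List.length).getD (i - 1) 0) j = true) := by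
      intro j hj
      obtain ⟨i, hi, rfl⟩ := List.mem_map.1 hj
      have hi' : i < m := List.mem_range.1 hi
      have e1 : ((g ++ rest).map List.length).getD (i + 1) 0 = k := getg _ (by omega)
      have e2 : ((g ++ rest).map List.length).getD (i + 1 - 1) 0 = k := getg _ (by omega)
      simp only [Bool.or_eq_true, beq_iff_eq, bne_iff_ne, ne_eq, not_or, not_not]
      exact ⟨by omega, e1.trans e2.symm⟩
    rw [List.filter_eq_nil_iff.2 this]
  rw [h1]
  -- second block: the rest-relative boundaries, shifted by g.length
  have h2 : ((List.range rest.length).map (fun x => g.length + x)).filter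
      (fun i => i == 0 || ((g ++ rest).map List.length).getD i 0 != ((g ++ rest).map List.length).getD (i - 1) 0) =
      ((List.range rest.length).filter
        (fun i => i == 0 || (rest.map List.length).getD i 0 != (rest.map List.length).getD (i - 1) 0)).map (fun x => g.length + x) := by
    rw [List.filter_map]
    refine congrArg _ (List.filter_congr ?_)
    intro j hj
    have hj' : j < rest.length := List.mem_range.1 hj
    cases j with
    | zero =>
      cases rest with
      | nil => simp at hj'
      | cons h0 rest' =>
        have e1 : ((g ++ (h0 :: rest')).map List.length).getD g.length 0 = h0.length := by
          have := getr 0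
          simp only [Nat.add_zero] at this
          rw [this]
          rfl
        have e2 : ((g ++ (h0 :: rest')).map List.length).getD (g.length - 1) 0 = k := getg _ (by omega)
        have hne : h0.length ≠ k := hr h0 (by simp)
        simp only [Function.comp_apply, Nat.add_zero]
        rw [e1, e2]
        simp [hne]
    | succ i =>
      have a1 := getr (i + 1)
      have a2 := getr i
      have l2 : g.length + (i + 1) - 1 = g.length + i := by omega
      simp only [Function.comp_apply, l2, a1, a2, Nat.add_sub_cancel]
      have hz1 : (g.length + (i + 1) == 0) = false := by simp
      have hz2 : ((i : Nat) + 1 == 0) = false := by simp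
      rw [hz1, hz2]
  rw [h2]
  rfl

theorem bounds2_append (g rest : List (List Int)) (k : Nat) (hg : g ≠ [])
    (hgk : ∀ y ∈ g, y.length = k) (hr : ∀ h ∈ rest.head?, h.length ≠ k) :
    fglBounds2 (g ++ rest) = 0 :: (fglBounds2 rest).map (fun x => g.length + x) := by
  unfold fglBounds2
  rw [bounds_append g rest k hg hgk hr]
  simp

theorem alt_append (g rest : List (List Int)) (k : Nat) (hg : g ≠ [])
    (hgk : ∀ y ∈ g, y.length = k) (hr : ∀ h ∈ rest.head?, h.length ≠ k) :
    f_group_list_alt (g ++ rest) = g :: f_group_list_alt rest := by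
  rw [alt_eq, alt_eq, bounds2_append g rest k hg hgk hr]
  set s := fglBounds2 rest with hs
  have hshape : s = 0 :: s.tail := bounds_head rest
  have htmap : (s.map (fun x => g.length + x)) = g.length :: (s.tail.map (fun x => g.length + x)) := by
    conv_lhs => rw [hshape]
    simp
  rw [htmap]
  simp only [List.zip_cons_cons, List.tail_cons, List.map_cons]
  congr 1
  · -- first slice is exactly g
    simp
  · -- remaining slices live in rest, shifted by g.length
    rw [← htmap, List.zip_map, List.map_map]
    refine List.map_congr_left ?_
    intro p _
    simp only [Function.comp_apply, Prod.map_fst, Prod.map_snd]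
    rw [List.drop_length_add_append, Nat.add_sub_add_left]

theorem rec_eq_alt (l : List (List Int)) : fglRec l = f_group_list_alt l := by
  induction l using fglRec.induct with
  | case1 => simp [fglRec, f_group_list_alt]
  | case2 x xs r ih =>
    obtain ⟨hsplit, hrun, hrest⟩ := fglRun_split x.length xs
    rw [fglRec]
    have hx : x :: xs = (x :: (fglRun x.length xs).1) ++ (fglRun x.length xs).2 := by
      simp [hsplit]
    conv_rhs => rw [hx]
    rw [alt_append _ _ x.length (by simp) ?_ hrest]
    · rw [ih]
    · intro y hy
      rcases List.mem_cons.1 hy with h | h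
      · simp [h]
      · exact hrun y h

-- ===== VERDICT (by name: the statement is the Claim_ definition above) =====
theorem f_group_list_spec : Claim_equal_f_group_list := by
  intro input_list _
  show f_group_list input_list = f_group_list_alt input_list
  rw [a_eq_rec, rec_eq_alt]
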